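-- pv_equiv track=rewrite | github.com/blegloannec/CodeProblems | CodinGame/Community/queneau_numbers.py | queneau_perm
-- ===== SOURCE A (Python) =====
-- def queneau_perm(N):
--     P = []
--     a,b = N-1,0
--     while a>b:
--         P += [a,b]
--         a -= 1
--         b += 1
--     if a==b:
--         P.append(a)
--     return P
-- ===== SOURCE B (Python) =====
-- def queneau_perm(N):
--     # closed-form index mapping: position i holds N-1-i//2 (even i) or i//2 (odd i)
--     return [(N - 1 - i // 2) if i % 2 == 0 else i // 2 for i in range(N)]
-- ===== Notes on version B (the rewrite author's own statement) =====
-- stated objective: simpler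
-- what changed: Replaces the two-pointer while-loop with a middle-element special case by a single comprehension computing each element in closed form from its index parity.
import Mathlib
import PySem

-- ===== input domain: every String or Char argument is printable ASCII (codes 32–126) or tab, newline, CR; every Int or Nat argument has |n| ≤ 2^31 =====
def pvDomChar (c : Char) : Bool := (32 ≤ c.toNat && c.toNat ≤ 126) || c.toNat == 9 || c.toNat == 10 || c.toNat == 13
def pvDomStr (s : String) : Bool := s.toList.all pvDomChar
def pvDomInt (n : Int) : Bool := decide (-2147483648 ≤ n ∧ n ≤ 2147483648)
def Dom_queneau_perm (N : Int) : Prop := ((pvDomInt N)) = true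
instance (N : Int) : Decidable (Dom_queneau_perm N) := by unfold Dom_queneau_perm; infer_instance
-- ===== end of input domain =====

-- B replaces A's two-pointer while-loop (with middle-element special case) by a single
-- closed-form map over range(N): simpler decomposition, same O(n) cost.

-- ===== PORT A =====
-- the while-loop of A as structural recursion on the state (a, b, P)
def queneauLoop (a b : Int) (P : List Int) : List Int :=
  if a > b then queneauLoop (a - 1) (b + 1) (P ++ [a, b])
  else if a = b then P ++ [a]
  else P
termination_by (a - b).toNat
decreasing_by omega

def queneau_perm (N : Int) : List Int := queneauLoop (N - 1) 0 []

-- ===== PORT B =====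
def queneau_perm_alt (N : Int) : List Int :=
  (PySem.List.pyRange 0 N 1).map (fun i =>
    if PySem.Int.mod i 2 = 0 then N - 1 - PySem.Int.floordiv i 2
    else PySem.Int.floordiv i 2)

-- ===== PRECONDITION & SPEC =====
def Spec_queneau_perm (N : Int) (out : List Int) : Prop := out = queneau_perm_alt N
instance (N : Int) (out : List Int) : Decidable (Spec_queneau_perm N out) := by unfold Spec_queneau_perm; infer_instance

-- ===== CLAIM (what is proved, stated in full; the proofs are below) =====
def Claim_equal_queneau_perm : Prop := ∀ (N : Int), Dom_queneau_perm N → Spec_queneau_perm N (queneau_perm N)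

-- ===== LEMMAS AND PROOFS =====

theorem queneauLoop_gt {a b : Int} (P : List Int) (h : a > b) :
    queneauLoop a b P = queneauLoop (a - 1) (b + 1) (P ++ [a, b]) := by
  rw [queneauLoop]; simp [h]

theorem queneauLoop_eq {a b : Int} (P : List Int) (h : a = b) :
    queneauLoop a b P = P ++ [a] := by
  rw [queneauLoop]; simp [h]

theorem queneauLoop_lt {a b : Int} (P : List Int) (h : a < b) :
    queneauLoop a b P = P := by
  rw [queneauLoop]
  have h1 : ¬ a > b := by omega
  have h2 : ¬ a = b := by omega
  simp [h1, h2]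

theorem queneauLoop_acc :
    ∀ (n : Nat) (a b : Int) (P : List Int), (a - b).toNat = n →
      queneauLoop a b P = P ++ queneauLoop a b [] := by
  intro n
  induction n using Nat.strong_induction_on with
  | _ n ih =>
    intro a b P hn
    rcases lt_trichotomy a b with h | h | h
    · rw [queneauLoop_lt P h, queneauLoop_lt [] h, List.append_nil]
    · rw [queneauLoop_eq P h, queneauLoop_eq [] h]; simp
    · have hm : ((a - 1) - (b + 1)).toNat < n := by omega
      rw [queneauLoop_gt P h, queneauLoop_gt [] h,
        ih _ hm (a - 1) (b + 1) (P ++ [a, b]) rfl,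
        ih _ hm (a - 1) (b + 1) ([] ++ [a, b]) rfl]
      simp

-- characterisation of the loop result as a closed-form map over List.range
theorem queneauLoop_closed :
    ∀ (m : Nat) (a b : Int), a - b + 1 = (m : Int) →
      queneauLoop a b [] = (List.range m).map (fun k =>
        if k % 2 = 0 then a - (k / 2 : Nat) else b + (k / 2 : Nat)) := by
  intro m
  induction m using Nat.strong_induction_on with
  | _ m ih =>
    intro a b hm
    rcases lt_trichotomy a b with h | h | h
    · -- a < b : m = 0 since a - b + 1 ≤ 0 and m ≥ 0
      have : m = 0 := by omega
      subst this
      simp [queneauLoop_lt [] h]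
    · -- a = b : m = 1
      have : m = 1 := by omega
      subst this
      simp [queneauLoop_eq [] h, List.range_succ]
    · -- a > b : m ≥ 2, peel one iteration
      obtain ⟨m', rfl⟩ : ∃ m', m = m' + 2 := ⟨m - 2, by omega⟩
      rw [queneauLoop_gt [] h, queneauLoop_acc ((a - 1) - (b + 1)).toNat _ _ _ rfl,
        ih m' (by omega) (a - 1) (b + 1) (by omega)]
      have hrange : List.range (m' + 2) =
          0 :: 1 :: (List.range m').map (fun k => k + 2) := by
        rw [List.range_succ_eq_map, List.range_succ_eq_map, List.map_cons,
          List.map_map]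
        rfl
      rw [hrange, List.map_cons, List.map_cons, List.map_map]
      simp only [List.nil_append, List.cons_append]
      refine List.cons_eq_cons.mpr ⟨by norm_num, List.cons_eq_cons.mpr ⟨by norm_num, ?_⟩⟩
      apply List.map_congr_left
      intro k _
      have hpar : (k + 2) % 2 = k % 2 := by omega
      have hdiv : (k + 2) / 2 = k / 2 + 1 := by omega
      simp only [Function.comp, hpar, hdiv]
      by_cases hk2 : k % 2 = 0 <;> simp [hk2] <;> omega

-- bridge: B's pyRange/floordiv formula equals the same closed form
theorem alt_closed (N : Int) :
    queneau_perm_alt N = (List.range N.toNat).map (fun k =>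
      if k % 2 = 0 then (N - 1) - ((k / 2 : Nat) : Int) else 0 + ((k / 2 : Nat) : Int)) := by
  unfold queneau_perm_alt
  rw [PySem.List.pyRange_one, List.map_map]
  have hN : (N - 0).toNat = N.toNat := by omega
  rw [hN]
  apply List.map_congr_left
  intro k _
  simp only [Function.comp, zero_add]
  rw [PySem.Int.mod_eq_emod_of_pos (by norm_num), PySem.Int.floordiv_eq_ediv_of_pos (by norm_num)]
  have hd : ((k : Int) / 2) = ((k / 2 : Nat) : Int) := by omega
  rw [hd]
  by_cases h : k % 2 = 0
  · rw [if_pos (by omega : ((k : Int) % 2 = 0)), if_pos h]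
  · rw [if_neg (by omega : ¬ ((k : Int) % 2 = 0)), if_neg h]

-- ===== VERDICT (by name: the statement is the Claim_ definition above) =====
theorem queneau_perm_spec : Claim_equal_queneau_perm := by
  intro N _
  unfold Spec_queneau_perm queneau_perm
  rw [alt_closed]
  rcases le_or_gt N 0 with h | h
  · have h1 : N - 1 < 0 := by omega
    have h2 : N.toNat = 0 := by omega
    rw [queneauLoop_lt [] (by omega : N - 1 < (0:Int)), h2]
    simp
  · exact queneauLoop_closed N.toNat (N - 1) 0 (by omega)
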